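-- pv_equiv track=rewrite | github.com/aryannaik225/Python-Practice | Assignment 2 Week 10.py | rowssum
-- ===== SOURCE A (Python) =====
-- def rowssum(matrix1):
--     #sum of elements in each row
--     rowsum = []
--     for i in range(len(matrix1)):
--         sum = 0
--         for j in range(len(matrix1)):
--             sum+=matrix1[i][j]
--         rowsum.append(sum)
--     rowResult = False
--     for i in range(len(matrix1)-1):
--         if rowsum[i]==rowsum[i+1]:
--             rowResult = True
--         else:
--             rowResult = False
--             break
--
--     return rowResult
-- ===== SOURCE B (Python) =====
-- def rowssum(matrix1):
--     n = len(matrix1)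
--     if n < 2:
--         return False
--     target = sum(matrix1[0][j] for j in range(n))
--     for row in matrix1[1:]:
--         if sum(row[j] for j in range(n)) != target:
--             return False
--     return True
-- ===== Notes on version B (the rewrite author's own statement) =====
-- stated objective: faster
-- what changed: B drops A's intermediate rowsum list and consecutive-pair comparison: it computes the first row's sum once and makes a single early-exiting pass comparing every remaining row's sum to it (no list built, stops at the first mismatch); Pre_ excludes only ragged matrices (a row shorter than the number of rows), on which A raises IndexError.
import Mathlib
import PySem

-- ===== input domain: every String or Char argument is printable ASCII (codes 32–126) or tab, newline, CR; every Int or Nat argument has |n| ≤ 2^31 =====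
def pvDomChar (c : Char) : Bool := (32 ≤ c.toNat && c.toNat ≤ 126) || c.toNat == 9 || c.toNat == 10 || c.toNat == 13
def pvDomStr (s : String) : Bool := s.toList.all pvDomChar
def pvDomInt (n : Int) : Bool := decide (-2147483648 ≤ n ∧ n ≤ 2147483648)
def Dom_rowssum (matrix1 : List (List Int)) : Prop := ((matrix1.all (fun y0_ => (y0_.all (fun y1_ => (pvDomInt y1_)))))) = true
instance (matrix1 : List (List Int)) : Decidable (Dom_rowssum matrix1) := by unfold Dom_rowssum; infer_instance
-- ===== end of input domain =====

-- B replaces A's rowsum-list-then-consecutive-compare with a single early-exiting pass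
-- comparing each remaining row's sum to the first row's sum ('simpler' objective).

-- ===== PORT A =====
-- the third Python loop of A: for i in range(len(matrix1)-1): compare rowsum[i], rowsum[i+1], break on mismatch
def pvCmpLoopA (rowsum : List Int) (acc : Bool) : List Int → Bool
  | [] => acc
  | i :: rest =>
    if PySem.List.pyGetD rowsum i 0 = PySem.List.pyGetD rowsum (i + 1) 0
    then pvCmpLoopA rowsum true rest
    else false

def rowssum (matrix1 : List (List Int)) : Bool :=
  let n : Int := matrix1.length
  -- rowsum.append(sum) loop: sum over j in range(len(matrix1)) of matrix1[i][j]
  let rowsum : List Int := (PySem.List.pyRange 0 n 1).map (fun i =>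
    (PySem.List.pyRange 0 n 1).foldl (fun s j =>
      s + PySem.List.pyGetD (PySem.List.pyGetD matrix1 i []) j 0) 0)
  pvCmpLoopA rowsum false (PySem.List.pyRange 0 (n - 1) 1)

-- ===== PORT B =====
-- sum(row[j] for j in range(n))
def pvRowSumB (n : Int) (row : List Int) : Int :=
  (PySem.List.pyRange 0 n 1).foldl (fun s j => s + PySem.List.pyGetD row j 0) 0

-- for row in matrix1[1:]: return False on first mismatching row sum
def pvScanB (n target : Int) : List (List Int) → Bool
  | [] => true
  | row :: rest =>
    if pvRowSumB n row ≠ target then false else pvScanB n target rest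

def rowssum_alt (matrix1 : List (List Int)) : Bool :=
  let n : Int := matrix1.length
  if n < 2 then false
  else pvScanB n (pvRowSumB n (PySem.List.pyGetD matrix1 0 [])) matrix1.tail

-- ===== PRECONDITION & SPEC =====
-- Pre_ excludes exactly the ragged matrices on which Python A raises IndexError:
-- some row shorter than the number of rows (each row is summed over range(len(matrix1))).
def Pre_rowssum (matrix1 : List (List Int)) : Prop :=
  ∀ row ∈ matrix1, matrix1.length ≤ row.length
instance (matrix1 : List (List Int)) : Decidable (Pre_rowssum matrix1) := by
  unfold Pre_rowssum; infer_instance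

def pvWitness_rowssum : List (List Int) := [[1, 2], [2, 1]]

def Spec_rowssum (matrix1 : List (List Int)) (out : Bool) : Prop := out = rowssum_alt matrix1
instance (matrix1 : List (List Int)) (out : Bool) : Decidable (Spec_rowssum matrix1 out) := by unfold Spec_rowssum; infer_instance

-- ===== CLAIM (what is proved, stated in full; the proofs are below) =====
def Claim_equal_rowssum : Prop := ∀ (matrix1 : List (List Int)), Dom_rowssum matrix1 → Pre_rowssum matrix1 → Spec_rowssum matrix1 (rowssum matrix1)

-- ===== LEMMAS AND PROOFS =====

-- chain of consecutive equalities, proof-side characterisation of A's third loop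
def pvChain : List Int → Bool
  | [] => true
  | [_] => true
  | x :: y :: t => (x == y) && pvChain (y :: t)

-- A's compare loop over range(a, L-1) (L the length of s) equals acc (empty range) or the chain test on s.drop a
theorem pvCmpLoopA_eq (s : List Int) (L : Nat) (hL : L = s.length) (a : Nat) (acc : Bool) :
    pvCmpLoopA s acc (PySem.List.pyRange a ((L : Int) - 1) 1) =
      if L ≤ a + 1 then acc else pvChain (s.drop a) := by
  subst hL
  generalize hd : s.length - (a + 1) = d
  induction d generalizing a acc with
  | zero =>
    have hle : s.length ≤ a + 1 := by omega
    rw [PySem.List.pyRange_one_eq_nil (by omega)]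
    simp [pvCmpLoopA, hle]
  | succ d ih =>
    have hlt : a + 1 < s.length := by omega
    rw [PySem.List.pyRange_one_cons (by omega), if_neg (by omega)]
    have hx : (PySem.List.pyGetD s (a : Int) 0) = s.getD a 0 := PySem.List.pyGetD_natCast s a 0
    have hy : (PySem.List.pyGetD s ((a : Int) + 1) 0) = s.getD (a + 1) 0 := by
      have h := PySem.List.pyGetD_natCast s (a + 1) 0
      push_cast at h
      exact h
    have hdrop : s.drop a = s[a] :: s.drop (a + 1) := by
      rw [List.getElem_cons_drop (by omega)]
    have hdrop1 : s.drop (a + 1) = s[a + 1] :: s.drop (a + 2) := by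
      rw [List.getElem_cons_drop (by omega)]
    have hgx : s.getD a 0 = s[a] := List.getD_eq_getElem s 0 (by omega)
    have hgy : s.getD (a + 1) 0 = s[a + 1] := List.getD_eq_getElem s 0 (by omega)
    simp only [pvCmpLoopA, hx, hy, hgx, hgy]
    rw [hdrop, hdrop1]
    by_cases heq : s[a] = s[a + 1]
    · rw [if_pos heq]
      have hcast : (a : Int) + 1 = ((a + 1 : Nat) : Int) := by push_cast; ring
      rw [hcast, ih (a + 1) true (by omega)]
      simp only [pvChain]
      have hb : (s[a] == s[a + 1]) = true := by simp [heq]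
      rw [hb, Bool.true_and, hdrop1]
      by_cases hend : s.length ≤ a + 1 + 1
      · have hnil : s.drop (a + 2) = [] := List.drop_eq_nil_of_le (by omega)
        rw [if_pos hend, hnil]
        rfl
      · rw [if_neg hend]
    · rw [if_neg heq]
      simp only [pvChain]
      have hb : (s[a] == s[a + 1]) = false := by simp [heq]
      rw [hb, Bool.false_and]

-- the chain test on x :: xs equals "every element of xs equals x"
theorem pvChain_eq_all (x : Int) (xs : List Int) :
    pvChain (x :: xs) = xs.all (· == x) := by
  induction xs generalizing x with
  | nil => rfl
  | cons y t ih =>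
    rw [pvChain, ih y]
    by_cases h : x = y
    · subst h; simp
    · have h1 : (x == y) = false := by simp [h]
      have h2 : (y == x) = false := by simp [Ne.symm h]
      simp only [List.all_cons, h1, h2, Bool.false_and]

-- B's scan equals an all-test
theorem pvScanB_eq_all (n target : Int) (rs : List (List Int)) :
    pvScanB n target rs = rs.all (fun r => pvRowSumB n r == target) := by
  induction rs with
  | nil => rfl
  | cons r t ih =>
    rw [pvScanB, ih]
    by_cases h : pvRowSumB n r = target
    · simp [h]
    · simp [h]

-- A's rowsum list is the map of pvRowSumB over the rows
theorem pvRowsumList_eq (matrix1 : List (List Int)) :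
    (PySem.List.pyRange 0 (matrix1.length : Int) 1).map (fun i =>
      (PySem.List.pyRange 0 (matrix1.length : Int) 1).foldl (fun s j =>
        s + PySem.List.pyGetD (PySem.List.pyGetD matrix1 i []) j 0) 0)
    = matrix1.map (pvRowSumB (matrix1.length : Int)) := by
  have h1 : (PySem.List.pyRange 0 (matrix1.length : Int) 1).map
      (fun i => PySem.List.pyGetD matrix1 i []) = matrix1 := by
    simpa using PySem.List.map_pyGetD_pyRange_zero' matrix1 ([] : List Int)
  calc (PySem.List.pyRange 0 (matrix1.length : Int) 1).map (fun i =>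
          pvRowSumB (matrix1.length : Int) (PySem.List.pyGetD matrix1 i []))
      = ((PySem.List.pyRange 0 (matrix1.length : Int) 1).map
          (fun i => PySem.List.pyGetD matrix1 i [])).map
          (pvRowSumB (matrix1.length : Int)) := by rw [List.map_map]; rfl
    _ = matrix1.map (pvRowSumB (matrix1.length : Int)) := by rw [h1]

-- ===== VERDICT (by name: the statement is the Claim_ definition above) =====
theorem rowssum_spec : Claim_equal_rowssum := by
  intro matrix1 _hdom _hpre
  unfold Spec_rowssum rowssum rowssum_alt
  dsimp only
  rw [pvRowsumList_eq]
  have hcmp := pvCmpLoopA_eq (matrix1.map (pvRowSumB (matrix1.length : Int))) matrix1.length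
    (by simp) 0 false
  push_cast at hcmp
  rw [hcmp]
  match matrix1 with
  | [] => rfl
  | [r] => rfl
  | r0 :: r1 :: rest =>
    rw [if_neg (by simp)]
    rw [if_neg (by push_cast [List.length_cons]; omega)]
    simp only [List.drop_zero, List.map_cons, List.tail_cons,
      PySem.List.pyGetD_zero_cons]
    rw [pvChain_eq_all, pvScanB_eq_all]
    simp [List.all_map, Function.comp_def]
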